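-- pv_equiv track=rewrite | github.com/KumarAmbuj/gfg_hashing_intermediate | 31.palindromic.py | palindromic
-- ===== SOURCE A (Python) =====
-- def palindromic(arr):
--     hash={}
--     for x in arr:
--         if x in hash:
--             hash[x]+=1
--         else:
--             hash[x]=1
--     count=0
--     for x in hash:
--         if hash[x]==1:
--             count+=1
--     return count-1
-- ===== SOURCE B (Python) =====
-- def palindromic(arr):
--     s = sorted(arr)
--     n = len(s)
--     count = 0
--     i = 0
--     while i < n:
--         j = i + 1
--         while j < n and s[j] == s[i]:
--             j += 1
--         if j == i + 1:
--             count += 1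
--         i = j
--     return count - 1
-- ===== Notes on version B (the rewrite author's own statement) =====
-- stated objective: alternative
-- what changed: B sorts a copy of the list and counts singleton runs in one linear scan over the sorted list, instead of building a frequency dictionary and re-scanning its keys.
import Mathlib
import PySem

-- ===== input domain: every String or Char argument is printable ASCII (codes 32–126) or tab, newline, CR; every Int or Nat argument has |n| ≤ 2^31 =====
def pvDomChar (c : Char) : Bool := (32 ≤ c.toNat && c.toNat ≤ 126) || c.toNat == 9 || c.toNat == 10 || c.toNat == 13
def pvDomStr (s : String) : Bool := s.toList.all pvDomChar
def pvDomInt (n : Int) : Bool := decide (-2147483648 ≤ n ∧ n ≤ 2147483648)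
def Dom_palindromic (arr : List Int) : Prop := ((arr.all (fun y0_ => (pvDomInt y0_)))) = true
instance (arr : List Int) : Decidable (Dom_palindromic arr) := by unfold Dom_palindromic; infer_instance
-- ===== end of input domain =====

-- B sorts a copy of the list and counts singleton runs in one linear scan, instead of
-- building a frequency dictionary and re-scanning its keys (alternative decomposition).


-- ===== PORT A =====
-- body of A's first loop: 'if x in hash: hash[x]+=1 else: hash[x]=1'
def pvStepA (d : PySem.Dict Int Int) (x : Int) : PySem.Dict Int Int :=
  if d.contains x then d.modify x 0 (· + 1) else d.insert x 1

def palindromic (arr : List Int) : Int :=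
  let h := arr.foldl pvStepA PySem.Dict.empty
  let count := h.keys.foldl (fun c x => if h.getD x 0 = 1 then c + 1 else c) (0 : Int)
  count - 1

-- ===== PORT B =====
-- outer while loop of Source B: consume one run of equal elements per step
-- (j scanning the run = takeWhile/dropWhile split), add 1 when the run has length 1
def pvScan : List Int → Int
  | [] => 0
  | x :: t =>
      (if t.takeWhile (fun y => y == x) = [] then 1 else 0) +
        pvScan (t.dropWhile (fun y => y == x))
  termination_by l => l.length
  decreasing_by
    simpa using Nat.lt_succ_of_le (List.Sublist.length_le (List.dropWhile_sublist _))

def palindromic_alt (arr : List Int) : Int :=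
  pvScan (PySem.List.sorted arr (fun x => x) false) - 1

-- ===== PRECONDITION & SPEC =====
def Spec_palindromic (arr : List Int) (out : Int) : Prop := out = palindromic_alt arr
instance (arr : List Int) (out : Int) : Decidable (Spec_palindromic arr out) := by unfold Spec_palindromic; infer_instance

-- ===== CLAIM (what is proved, stated in full; the proofs are below) =====
def Claim_equal_palindromic : Prop := ∀ (arr : List Int), Dom_palindromic arr → Spec_palindromic arr (palindromic arr)

-- ===== LEMMAS AND PROOFS =====

-- A's dict-building step is exactly the Counter step
theorem pv_fold_eq_counter (arr : List Int) :
    arr.foldl pvStepA PySem.Dict.empty = PySem.Dict.counter arr := by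
  rw [← PySem.Dict.foldl_insert_getD_add_one_eq_counter]
  congr 1
  funext d x
  unfold pvStepA
  by_cases h : d.contains x
  · simp [h, PySem.Dict.modify]
  · have h' : d.contains x = false := by simpa using h
    rw [if_neg h]
    show d.insert x 1 = d.insert x (d.getD x 0 + 1)
    rw [PySem.Dict.getD_of_not_contains _ _ h', zero_add]

-- A computes (number of distinct values with count 1) − 1
theorem pv_A_eq (arr : List Int) :
    palindromic arr =
      ((PySem.List.dedup arr).countP (fun x => arr.count x == 1) : Int) - 1 := by
  unfold palindromic
  simp only []
  rw [pv_fold_eq_counter]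
  rw [PySem.List.foldl_ite_add_one (fun x => (PySem.Dict.counter arr).getD x 0 = 1)]
  simp only [PySem.Dict.keys_counter, ← PySem.List.dedup_eq_ofList, zero_add]
  congr 2
  apply List.countP_congr
  intro x _
  simp [PySem.Dict.getD_counter]

-- in a sorted list, the head does not reappear after its run
theorem pv_not_mem_dropWhile (x : Int) (t : List Int)
    (h : (x :: t).Pairwise (· ≤ ·)) : x ∉ t.dropWhile (fun y => y == x) := by
  induction t with
  | nil => simp
  | cons y t' ih =>
    by_cases hy : (y == x) = true
    · rw [List.dropWhile_cons, if_pos hy]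
      apply ih
      rcases List.pairwise_cons.mp h with ⟨h1, h2⟩
      rcases List.pairwise_cons.mp h2 with ⟨h3, h4⟩
      exact List.pairwise_cons.mpr ⟨fun z hz => h1 z (List.mem_cons_of_mem _ hz), h4⟩
    · rw [List.dropWhile_cons, if_neg hy]
      intro hmem
      rcases List.pairwise_cons.mp h with ⟨h1, h2⟩
      rcases List.pairwise_cons.mp h2 with ⟨h3, _⟩
      have hxy : x ≤ y := h1 y (List.mem_cons_self)
      rcases List.mem_cons.mp hmem with rfl | hx'
      · simp at hy
      · have := h3 x hx'
        have : x = y := le_antisymm hxy this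
        simp [this] at hy

-- pvScan on a sorted list counts the distinct values of count 1
theorem pv_scan_eq (l : List Int) (hs : l.Pairwise (· ≤ ·)) :
    pvScan l = ((PySem.List.dedup l).countP (fun x => l.count x == 1) : Int) := by
  induction l using pvScan.induct with
  | case1 => simp [pvScan, PySem.List.dedup_eq_ofList, PySem.Set.ofList]
  | case2 x t ih =>
    set tk := t.takeWhile (fun y => y == x) with htk
    set dr := t.dropWhile (fun y => y == x) with hdr
    have hsplit : tk ++ dr = t := List.takeWhile_append_dropWhile
    have htkx : ∀ y ∈ tk, y = x := by
      intro y hy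
      have := List.mem_takeWhile_imp hy
      simpa using this
    have hxdr : x ∉ dr := pv_not_mem_dropWhile x t hs
    have hdrs : dr.Pairwise (· ≤ ·) :=
      List.Pairwise.sublist ((List.dropWhile_sublist _).cons _) hs
    have ihv := ih hdrs
    -- counts in l = x :: tk ++ dr
    have hcount_x : (x :: t).count x = 1 + tk.length := by
      rw [← hsplit, List.count_cons_self, List.count_append,
        List.count_eq_zero.mpr hxdr]
      have : tk.count x = tk.length := by
        apply List.count_eq_length.mpr
        intro y hy; exact (htkx y hy).symm
      omega
    have hcount_ne : ∀ y, y ≠ x → (x :: t).count y = dr.count y := by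
      intro y hy
      have h0 : tk.count y = 0 :=
        List.count_eq_zero.mpr (fun hmem => hy (htkx y hmem))
      rw [← hsplit, List.count_cons_of_ne hy.symm, List.count_append, h0]
      omega
    -- dedup (x :: t) is a permutation of x :: dedup dr
    have hperm : (PySem.List.dedup (x :: t)).Perm (x :: PySem.List.dedup dr) := by
      apply (List.perm_ext_iff_of_nodup (PySem.List.nodup_dedup _) ?_).mpr
      · intro a
        simp only [PySem.List.mem_dedup, List.mem_cons, ← hsplit, List.mem_append]
        constructor
        · rintro (rfl | h | h)
          · exact Or.inl rfl
          · exact Or.inl (htkx a h)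
          · exact Or.inr h
        · rintro (rfl | h)
          · exact Or.inl rfl
          · exact Or.inr (Or.inr h)
      · exact List.nodup_cons.mpr
          ⟨fun h => hxdr ((PySem.List.mem_dedup _ _).mp h), PySem.List.nodup_dedup _⟩
    rw [pvScan, ← htk, ← hdr, ihv, hperm.countP_eq]
    rw [List.countP_cons]
    have hcongr :
        (PySem.List.dedup dr).countP (fun y => (x :: t).count y == 1) =
          (PySem.List.dedup dr).countP (fun y => dr.count y == 1) := by
      apply List.countP_congr
      intro y hy
      have hyx : y ≠ x := fun h => hxdr (h ▸ (PySem.List.mem_dedup _ _).mp hy)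
      rw [hcount_ne y hyx]
    rw [hcongr]
    have hpx : ((x :: t).count x == 1) = decide (tk = []) := by
      rw [hcount_x]
      cases tk with
      | nil => simp
      | cons a l => simp
    rw [hpx]
    by_cases he : tk = [] <;> simp [he] <;> try omega

-- transporting the count from sorted arr back to arr
theorem pv_B_eq (arr : List Int) :
    palindromic_alt arr =
      ((PySem.List.dedup arr).countP (fun x => arr.count x == 1) : Int) - 1 := by
  unfold palindromic_alt
  have hperm : (PySem.List.sorted arr (fun x => x) false).Perm arr :=
    PySem.List.sorted_perm arr (fun x => x) false
  have hs : (PySem.List.sorted arr (fun x => x) false).Pairwise (· ≤ ·) := by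
    simpa using PySem.List.sorted_pairwise arr (fun x => x)
  rw [pv_scan_eq _ hs]
  congr 2
  have hdperm : (PySem.List.dedup (PySem.List.sorted arr (fun x => x) false)).Perm
      (PySem.List.dedup arr) := by
    apply (List.perm_ext_iff_of_nodup (PySem.List.nodup_dedup _)
      (PySem.List.nodup_dedup _)).mpr
    intro a
    simp only [PySem.List.mem_dedup]
    exact hperm.mem_iff
  rw [hdperm.countP_eq]
  apply List.countP_congr
  intro y _
  rw [hperm.count_eq]

-- ===== VERDICT (by name: the statement is the Claim_ definition above) =====
theorem palindromic_spec : Claim_equal_palindromic := by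
  intro arr _
  unfold Spec_palindromic
  rw [pv_A_eq, pv_B_eq]
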